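-- pv_equiv track=rewrite | github.com/jirka-tribi/advent_of_code | 2015/11/1and2.py | is_validated
-- ===== SOURCE A (Python) =====
-- from typing import List
--
-- FORBIDDEN = [105, 108, 111]
--
-- def is_validated(abc_int: List[int]) -> bool:
--     validated_inc = False
--     validate_double = False
--     forbidden_double = 0
--
--     for number in abc_int:
--         if number in FORBIDDEN:
--             return False
--
--     first = abc_int[0]
--     second = abc_int[1]
--     counter = 0
--     for i in range(2, len(abc_int)):
--         third = abc_int[i]
--
--         if first == second and first != forbidden_double:
--             counter += 1
--             forbidden_double = first
--         if i == len(abc_int) - 1: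
--             if second == third and second != forbidden_double:
--                 counter += 1
--                 forbidden_double = third
--
--         if first + 2 == second + 1 == third:
--             validated_inc = True
--
--         first = second
--         second = third
--
--     if counter >= 2:
--         validate_double = True
--
--     return validated_inc and validate_double
-- ===== SOURCE B (Python) =====
-- FORBIDDEN = [105, 108, 111]
--
-- def is_validated(abc_int):
--     if any(n in FORBIDDEN for n in abc_int):
--         return False
--     triple = any(x + 1 == y and y + 1 == z
--                  for x, y, z in zip(abc_int, abc_int[1:], abc_int[2:]))
--     pairs = {x for x, y in zip(abc_int, abc_int[1:]) if x == y}
--     return triple and len(pairs) >= 2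
-- ===== Notes on version B (the rewrite author's own statement) =====
-- stated objective: simpler
-- what changed: A's single stateful sliding-window loop carrying (first, second, forbidden_double, counter, validated_inc) with a special-cased last iteration is replaced by three independent passes: a forbidden scan, a zip-based any() for the increasing triple, and a set comprehension collecting the distinct values of adjacent equal pairs (requiring at least two).
-- intended difference: On forbidden-free inputs with an increasing triple whose adjacent equal pairs are zero-valued pairs followed only by pairs of a single nonzero value, A returns False because its forbidden_double sentinel is initialised to 0 and never counts the leading zero pairs, while B returns True, the intended value since two pairs with distinct values are present. — e.g. on is_validated([0, 0, 1, 2, 3, 3]): A returns false, B returns true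
import Mathlib
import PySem

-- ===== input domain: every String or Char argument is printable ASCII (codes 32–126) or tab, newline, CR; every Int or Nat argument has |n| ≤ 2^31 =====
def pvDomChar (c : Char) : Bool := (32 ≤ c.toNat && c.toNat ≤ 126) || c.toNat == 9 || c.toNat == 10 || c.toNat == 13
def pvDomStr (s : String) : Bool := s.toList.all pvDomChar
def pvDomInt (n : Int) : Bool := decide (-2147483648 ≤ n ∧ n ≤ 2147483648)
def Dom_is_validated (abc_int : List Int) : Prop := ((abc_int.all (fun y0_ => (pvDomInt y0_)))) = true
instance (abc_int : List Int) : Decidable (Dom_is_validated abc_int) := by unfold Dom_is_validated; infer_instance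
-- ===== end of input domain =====

-- B replaces A's single stateful sliding-window loop by three independent passes (forbidden scan,
-- zip-based triple scan, set of adjacent-pair values); objective: simpler.

-- ===== PORT A =====
def pyFORBIDDEN : List Int := [105, 108, 111]

-- the body of A's 'for i in range(2, len(abc_int))' loop, carrying the state
-- (first, second, forbidden_double, counter, validated_inc); lets mirror A's statements in order
def stepA (abc_int : List Int) (n : Int) (st : Int × Int × Int × Int × Bool) (i : Int) :
    Int × Int × Int × Int × Bool :=
  let first := st.1
  let second := st.2.1
  let third := PySem.List.pyGetD abc_int i 0
  let p1 : Int × Int :=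
    if first = second ∧ first ≠ st.2.2.1 then (st.2.2.2.1 + 1, first)
    else (st.2.2.2.1, st.2.2.1)
  let p2 : Int × Int :=
    if i = n - 1 then
      (if second = third ∧ second ≠ p1.2 then (p1.1 + 1, third) else p1)
    else p1
  let inc := if first + 2 = second + 1 ∧ second + 1 = third then true else st.2.2.2.2
  (second, third, p2.2, p2.1, inc)

-- literal transliteration of A: early-return forbidden scan, unconditional abc_int[0]/abc_int[1]
-- (none = IndexError, those inputs are excluded by Pre_), then the indexed loop over range(2, len)
def is_validated (abc_int : List Int) : Bool :=
  if abc_int.any (fun number => pyFORBIDDEN.contains number) then false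
  else
    match PySem.List.pyGet? abc_int 0, PySem.List.pyGet? abc_int 1 with
    | some first0, some second0 =>
      let n : Int := PySem.List.len abc_int
      let st := (PySem.List.pyRange 2 n 1).foldl (stepA abc_int n) (first0, second0, 0, 0, false)
      st.2.2.2.2 && decide (2 ≤ st.2.2.2.1)
    | _, _ => false

-- ===== PORT B =====
-- literal transliteration of Source B: forbidden scan, then a zip3 'any' for the increasing triple
-- and a set comprehension over adjacent equal pairs
def is_validated_alt (abc_int : List Int) : Bool :=
  if abc_int.any (fun n => pyFORBIDDEN.contains n) then false
  else
    let t1 := PySem.List.slice abc_int (some 1) none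
    let t2 := PySem.List.slice abc_int (some 2) none
    let triple := ((abc_int.zip t1).zip t2).any
      (fun p => decide (p.1.1 + 1 = p.1.2 ∧ p.1.2 + 1 = p.2))
    let pairs : PySem.Set Int :=
      PySem.Set.ofList (((abc_int.zip t1).filter (fun p => decide (p.1 = p.2))).map (fun p => p.1))
    triple && decide (2 ≤ pairs.length)

-- ===== PRECONDITION & SPEC =====
-- Pre_ excludes exactly the inputs where A raises IndexError: lists of length < 2 that
-- contain no forbidden value (on a forbidden value A returns False before indexing).
def Pre_is_validated (abc_int : List Int) : Prop :=
  2 ≤ abc_int.length ∨ ∃ x ∈ abc_int, x = 105 ∨ x = 108 ∨ x = 111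
instance (abc_int : List Int) : Decidable (Pre_is_validated abc_int) := by
  unfold Pre_is_validated; infer_instance
def pvWitness_is_validated : List Int := [97, 97, 98, 99, 100, 101, 101]

-- On forbidden-free inputs that have an increasing triple and whose adjacent equal pairs are some
-- zero-valued pairs followed only by pairs of one single nonzero value, A returns False — its
-- 'forbidden_double' sentinel starts at 0, so the leading zero pairs are never counted — while B
-- returns True, the intended value: two adjacent pairs with distinct values are present.
def D_is_validated (abc_int : List Int) : Prop :=
  (∀ x ∈ abc_int, x ∉ pyFORBIDDEN) ∧
  [1, 1] <:+: abc_int.tail.zipWith (· - ·) abc_int ∧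
  let S := (abc_int.zip abc_int.tail).filterMap fun p => if p.1 = p.2 then some p.1 else none
  (PySem.List.dedup S).length = 2 ∧ S.headI = 0 ∧ 0 ∉ S.dropWhile (· == 0)
instance (abc_int : List Int) : Decidable (D_is_validated abc_int) := by
  unfold D_is_validated; infer_instance

def Spec_is_validated (abc_int : List Int) (out : Bool) : Prop :=
  ¬ D_is_validated abc_int → out = is_validated_alt abc_int
instance (abc_int : List Int) (out : Bool) : Decidable (Spec_is_validated abc_int out) := by
  unfold Spec_is_validated; infer_instance

def pvDiffWitness_is_validated : List Int := [0, 0, 1, 2, 3, 3]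
def pvDiffWitnessOut_is_validated : Bool × Bool := (false, true)

-- ===== CLAIM (what is proved, stated in full; the proofs are below) =====
def Claim_unchanged_is_validated : Prop := ∀ (abc_int : List Int), Dom_is_validated abc_int → Pre_is_validated abc_int → Spec_is_validated abc_int (is_validated abc_int)
def Claim_changed_is_validated : Prop := Dom_is_validated (pvDiffWitness_is_validated) ∧ Pre_is_validated (pvDiffWitness_is_validated) ∧ D_is_validated (pvDiffWitness_is_validated) ∧ is_validated (pvDiffWitness_is_validated) = pvDiffWitnessOut_is_validated.1 ∧ is_validated_alt (pvDiffWitness_is_validated) = pvDiffWitnessOut_is_validated.2 ∧ pvDiffWitnessOut_is_validated.1 ≠ pvDiffWitnessOut_is_validated.2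
def Claim_exact_is_validated : Prop := ∀ (abc_int : List Int), Dom_is_validated abc_int → Pre_is_validated abc_int → D_is_validated abc_int → is_validated abc_int ≠ is_validated_alt abc_int
-- ===== LEMMAS AND PROOFS =====

-- structural mirror of A's loop over the elements abc_int[2:]
def loopA (f s fd c : Int) (inc : Bool) : List Int → Int × Bool
  | [] => (c, inc)
  | t :: rest =>
    let p1 : Int × Int := if f = s ∧ f ≠ fd then (c + 1, f) else (c, fd)
    let p2 : Int × Int :=
      if rest = [] then (if s = t ∧ s ≠ p1.2 then (p1.1 + 1, t) else p1) else p1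
    let inc' := if f + 2 = s + 1 ∧ s + 1 = t then true else inc
    loopA s t p2.2 p2.1 inc' rest

-- proof-side form of D_'s pair-value sequence: the ordered values of adjacent equal pairs
def pvPairSeq : List Int → List Int
  | x :: y :: rest => (if x = y then [x] else []) ++ pvPairSeq (y :: rest)
  | _ => []

lemma pairSeq_eq_filterMap (l : List Int) :
    ((l.zip l.tail).filterMap fun p => if p.1 = p.2 then some p.1 else none) = pvPairSeq l := by
  induction l with
  | nil => rfl
  | cons x t ih =>
    cases t with
    | nil => rfl
    | cons y r =>
      simp only [List.tail_cons] at ih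
      by_cases hxy : x = y <;>
        simp [pvPairSeq, hxy, ih]

lemma beq_zero_fun : (fun x : Int => x == 0) = fun x => decide (x = 0) := by
  funext x
  by_cases h : x = 0 <;> simp [h]

-- proof-side descriptor: the input contains three consecutive elements increasing by one
def pvHasTriple : List Int → Bool
  | x :: y :: z :: rest => (decide (x + 1 = y ∧ y + 1 = z)) || pvHasTriple (y :: z :: rest)
  | _ => false

-- D_'s infix condition on the difference list says exactly that such a triple exists
lemma diffs_infix_iff : ∀ (l : List Int),
    ([1, 1] <:+: l.tail.zipWith (· - ·) l) ↔ pvHasTriple l = true := by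
  intro l
  induction l with
  | nil => simp [pvHasTriple]
  | cons x t ih =>
    cases t with
    | nil => simp [pvHasTriple]
    | cons y r =>
      simp only [List.tail_cons] at ih ⊢
      show ([1, 1] <:+: (y - x) :: List.zipWith _ r (y :: r)) ↔ _
      rw [List.infix_cons_iff, ih]
      cases r with
      | nil =>
        simp [pvHasTriple, List.cons_prefix_cons]
      | cons z r' =>
        show ([1, 1] <+: (y - x) :: (z - y) :: _ ∨ _) ↔ _
        simp only [pvHasTriple, List.cons_prefix_cons, Bool.or_eq_true, decide_eq_true_eq]
        constructor
        · rintro (⟨h1, h2, _⟩ | h)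
          · exact Or.inl ⟨by omega, by omega⟩
          · exact Or.inr h
        · rintro (⟨h1, h2⟩ | h)
          · exact Or.inl ⟨by omega, by omega, by simp⟩
          · exact Or.inr h

-- A's greedy pair counter over the pair-value sequence
def cnt (fd c : Int) : List Int → Int
  | [] => c
  | v :: vs => if v ≠ fd then cnt v (c + 1) vs else cnt fd c vs

lemma foldl_stepA_base (l : List Int) (j : Nat) (h : l.length ≤ j)
    (f s fd c : Int) (inc : Bool) :
    ((PySem.List.pyRange (j : Int) (PySem.List.len l) 1).foldl (stepA l (PySem.List.len l))
      (f, s, fd, c, inc)).2.2.2 =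
    ((loopA f s fd c inc (l.drop j)).1, (loopA f s fd c inc (l.drop j)).2) := by
  rw [PySem.List.pyRange_one_eq_nil (by rw [PySem.List.len_eq]; exact_mod_cast h),
    List.drop_eq_nil_of_le h]
  simp [loopA]

lemma foldl_stepA_fuel : ∀ (fuel : Nat) (l : List Int) (j : Nat), l.length ≤ j + fuel →
    ∀ (f s fd c : Int) (inc : Bool),
    ((PySem.List.pyRange (j : Int) (PySem.List.len l) 1).foldl (stepA l (PySem.List.len l))
      (f, s, fd, c, inc)).2.2.2 =
    ((loopA f s fd c inc (l.drop j)).1, (loopA f s fd c inc (l.drop j)).2) := by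
  intro fuel
  induction fuel with
  | zero =>
    intro l j h f s fd c inc
    exact foldl_stepA_base l j (by omega) f s fd c inc
  | succ n ih =>
    intro l j h f s fd c inc
    by_cases hle : l.length ≤ j
    · exact foldl_stepA_base l j hle f s fd c inc
    · have hlt : j < l.length := by omega
      rw [PySem.List.pyRange_one_cons (by rw [PySem.List.len_eq]; exact_mod_cast hlt),
        List.foldl_cons]
      have hthird : PySem.List.pyGetD l (j : Int) 0 = l[j] := by
        rw [PySem.List.pyGetD_natCast]
        exact List.getD_eq_getElem l 0 hlt
      have hcast : ((j : Int) + 1) = (((j + 1 : Nat)) : Int) := by push_cast; ring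
      rw [hcast]
      have hdrop : l.drop j = l[j] :: l.drop (j + 1) := List.drop_eq_getElem_cons hlt
      rw [hdrop]
      simp only [stepA, hthird, loopA]
      by_cases hlast : j + 1 = l.length
      · have hc1 : (j : Int) = PySem.List.len l - 1 := by
          rw [PySem.List.len_eq]; omega
        have hc2 : l.drop (j + 1) = [] := List.drop_eq_nil_of_le (by omega)
        rw [if_pos hc1, if_pos hc2]
        rw [ih l (j + 1) (by omega)]
      · have hc1 : ¬ ((j : Int) = PySem.List.len l - 1) := by
          rw [PySem.List.len_eq]; omega
        have hc2 : ¬ (l.drop (j + 1) = []) := by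
          rw [List.drop_eq_nil_iff]; omega
        rw [if_neg hc1, if_neg hc2]
        rw [ih l (j + 1) (by omega)]

lemma loopA_inc : ∀ (ts : List Int) (f s fd c : Int) (inc : Bool),
    (loopA f s fd c inc ts).2 = (inc || pvHasTriple (f :: s :: ts)) := by
  intro ts
  induction ts with
  | nil => intro f s fd c inc; simp [loopA, pvHasTriple]
  | cons t rest ih =>
    intro f s fd c inc
    show (loopA s t _ _ (if f + 2 = s + 1 ∧ s + 1 = t then true else inc) rest).2 = _
    rw [ih]
    by_cases h : f + 1 = s ∧ s + 1 = t
    · have hd : pvHasTriple (f :: s :: t :: rest) = true := by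
        simp only [pvHasTriple, Bool.or_eq_true, decide_eq_true_eq]
        exact Or.inl ⟨h.1, h.2⟩
      rw [if_pos (show f + 2 = s + 1 ∧ s + 1 = t by omega), hd]
      simp
    · rw [if_neg (by omega)]
      by_cases h2 : pvHasTriple (s :: t :: rest) = true <;>
        simp [pvHasTriple, h, h2]

lemma loopA_cnt : ∀ (ts : List Int), ts ≠ [] → ∀ (f s fd c : Int) (inc : Bool),
    (loopA f s fd c inc ts).1 = cnt fd c (pvPairSeq (f :: s :: ts)) := by
  intro ts
  induction ts with
  | nil => intro h; exact absurd rfl h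
  | cons t rest ih =>
    intro _ f s fd c inc
    cases rest with
    | nil =>
      simp only [loopA, pvPairSeq, List.append_nil]
      split_ifs <;>
        simp only [cnt, List.cons_append, List.nil_append] <;>
        first | (split_ifs <;> omega) | omega
    | cons u rest' =>
      show (loopA s t _ _ _ (u :: rest')).1 = _
      rw [ih (by simp)]
      show cnt (if f = s ∧ f ≠ fd then (c + 1, f) else (c, fd)).2
            (if f = s ∧ f ≠ fd then (c + 1, f) else (c, fd)).1 _ = _
      by_cases h1 : f = s
      · by_cases h1f : f ≠ fd
        · rw [if_pos ⟨h1, h1f⟩]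
          simp only [pvPairSeq, if_pos h1, List.cons_append, List.nil_append]
          simp [cnt, h1f]
        · rw [not_not] at h1f
          rw [if_neg (by tauto)]
          simp only [pvPairSeq, if_pos h1, List.cons_append, List.nil_append]
          simp [cnt, h1f]
      · rw [if_neg (by tauto)]
        simp only [pvPairSeq, if_neg h1, List.nil_append]

lemma pairSeq_eq_zip (l : List Int) :
    ((l.zip l.tail).filter (fun p => decide (p.1 = p.2))).map (fun p => p.1) = pvPairSeq l := by
  induction l with
  | nil => rfl
  | cons x t ih =>
    cases t with
    | nil => rfl
    | cons y r =>
      simp only [List.tail_cons] at ih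
      by_cases hxy : x = y <;>
        simp [pvPairSeq, hxy, ih]

lemma triple_eq_zip (l : List Int) :
    ((l.zip l.tail).zip (l.drop 2)).any
      (fun p => decide (p.1.1 + 1 = p.1.2 ∧ p.1.2 + 1 = p.2)) = pvHasTriple l := by
  induction l with
  | nil => rfl
  | cons x t ih =>
    cases t with
    | nil => rfl
    | cons y r =>
      cases r with
      | nil => rfl
      | cons z r' =>
        simp only [List.tail_cons, List.zip_cons_cons, List.drop_succ_cons, List.drop_zero,
          List.any_cons, pvHasTriple]
        rw [← ih]
        simp

lemma A_char (a b : Int) (rest : List Int)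
    (hf : ¬ ((a :: b :: rest).any fun number => pyFORBIDDEN.contains number) = true) :
    is_validated (a :: b :: rest) =
      (pvHasTriple (a :: b :: rest) && decide (2 ≤ cnt 0 0 (pvPairSeq (a :: b :: rest)))) := by
  unfold is_validated
  rw [if_neg hf]
  have h0 : PySem.List.pyGet? (a :: b :: rest) 0 = some a :=
    PySem.List.pyGet?_zero_cons a (b :: rest)
  have h1 : PySem.List.pyGet? (a :: b :: rest) 1 = some b := by
    simp [PySem.List.pyGet?, PySem.List.pyIdx?]
  rw [h0, h1]
  dsimp only
  cases rest with
  | nil =>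
    rw [PySem.List.pyRange_one_eq_nil (by rw [PySem.List.len_eq]; norm_num)]
    simp [pvHasTriple]
  | cons t r =>
    have hs := foldl_stepA_fuel (a :: b :: t :: r).length (a :: b :: t :: r) 2
      (by omega) a b 0 0 false
    have hdrop : (a :: b :: t :: r).drop 2 = t :: r := rfl
    rw [hdrop, (by norm_num : (((2 : Nat)) : Int) = (2 : Int))] at hs
    rw [hs]
    rw [loopA_cnt (t :: r) (by simp), loopA_inc]
    simp

lemma B_char (l : List Int)
    (hf : ¬ l.any (fun n => pyFORBIDDEN.contains n) = true) :
    is_validated_alt l =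
      (pvHasTriple l && decide (2 ≤ (PySem.Set.ofList (pvPairSeq l)).length)) := by
  unfold is_validated_alt
  rw [if_neg hf, PySem.List.slice_from_one,
    (by simpa using PySem.List.slice_from_natCast l 2 :
      PySem.List.slice l (some 2) none = l.drop 2)]
  simp only [triple_eq_zip, pairSeq_eq_zip]

-- counter lemmas
lemma cnt_ge : ∀ (vs : List Int) (fd c : Int), c ≤ cnt fd c vs := by
  intro vs
  induction vs with
  | nil => intro fd c; simp [cnt]
  | cons v vs ih =>
    intro fd c
    by_cases hv : v = fd
    · simpa [cnt, hv] using ih fd c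
    · simp only [cnt, if_pos (show v ≠ fd from hv)]
      exact le_trans (by omega) (ih v (c + 1))

lemma cnt_mem_ne : ∀ (vs : List Int) (fd c x : Int), x ∈ vs → x ≠ fd → c + 1 ≤ cnt fd c vs := by
  intro vs
  induction vs with
  | nil => intro fd c x hx _; simp at hx
  | cons v vs ih =>
    intro fd c x hx hne
    by_cases hv : v = fd
    · rcases List.mem_cons.mp hx with rfl | hx'
      · exact absurd hv hne
      · simpa [cnt, hv] using ih fd c x hx' hne
    · simp only [cnt, if_pos (show v ≠ fd from hv)]
      exact le_trans (by omega) (cnt_ge vs v (c + 1))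

lemma cnt_skip : ∀ (xs : List Int) (ys : List Int) (fd c : Int),
    (∀ x ∈ xs, x = fd) → cnt fd c (xs ++ ys) = cnt fd c ys := by
  intro xs
  induction xs with
  | nil => intro ys fd c _; rfl
  | cons x xs ih =>
    intro ys fd c h
    have hx : x = fd := h x (by simp)
    subst hx
    simpa [cnt] using ih ys x c (fun y hy => h y (by simp [hy]))

lemma cnt_const (xs : List Int) (fd c : Int) (h : ∀ x ∈ xs, x = fd) :
    cnt fd c xs = c := by
  simpa using cnt_skip xs [] fd c h

lemma cnt_ge_one_ex : ∀ (vs : List Int) (fd c : Int), c + 1 ≤ cnt fd c vs → ∃ v ∈ vs, v ≠ fd := by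
  intro vs
  induction vs with
  | nil => intro fd c h; simp [cnt] at h
  | cons v vs ih =>
    intro fd c h
    by_cases hv : v = fd
    · simp only [cnt, hv, ne_eq, not_true_eq_false, if_false] at h
      obtain ⟨w, hw, hwne⟩ := ih fd c h
      exact ⟨w, by simp [hw], hwne⟩
    · exact ⟨v, by simp, hv⟩

lemma cnt_ge_two_ex : ∀ (vs : List Int) (fd c : Int), c + 2 ≤ cnt fd c vs →
    ∃ a ∈ vs, ∃ b ∈ vs, a ≠ b := by
  intro vs
  induction vs with
  | nil => intro fd c h; simp [cnt] at h
  | cons v vs ih =>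
    intro fd c h
    by_cases hv : v = fd
    · simp only [cnt, hv, ne_eq, not_true_eq_false, if_false] at h
      obtain ⟨a, ha, b, hb, hab⟩ := ih fd c h
      exact ⟨a, by simp [ha], b, by simp [hb], hab⟩
    · simp only [cnt, if_pos (show v ≠ fd from hv)] at h
      obtain ⟨w, hw, hwne⟩ := cnt_ge_one_ex vs v (c + 1) (by omega)
      exact ⟨v, by simp, w, by simp [hw], fun hh => hwne hh.symm⟩

lemma cnt_two_of_distinct_nonzero : ∀ (vs : List Int) (a b : Int),
    a ∈ vs → b ∈ vs → a ≠ b → a ≠ 0 → b ≠ 0 → 2 ≤ cnt 0 0 vs := by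
  intro vs
  induction vs with
  | nil => intro a b ha _ _ _ _; simp at ha
  | cons v vs ih =>
    intro a b ha hb hab ha0 hb0
    by_cases hv : v = 0
    · subst hv
      have ha' : a ∈ vs := by
        rcases List.mem_cons.mp ha with rfl | h
        · exact absurd rfl ha0
        · exact h
      have hb' : b ∈ vs := by
        rcases List.mem_cons.mp hb with rfl | h
        · exact absurd rfl hb0
        · exact h
      simpa [cnt] using ih a b ha' hb' hab ha0 hb0
    · simp only [cnt, if_pos (show v ≠ (0:Int) from hv)]
      by_cases hav : a = v
      · have hb' : b ∈ vs := by
          rcases List.mem_cons.mp hb with rfl | h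
          · exact absurd hav.symm (fun hh => hab hh.symm)
          · exact h
        have := cnt_mem_ne vs v (0 + 1) b hb' (by rw [← hav]; exact fun hh => hab hh.symm)
        omega
      · have ha' : a ∈ vs := by
          rcases List.mem_cons.mp ha with rfl | h
          · exact absurd rfl hav
          · exact h
        have := cnt_mem_ne vs v (0 + 1) a ha' hav
        omega

lemma cnt_two_of_zero_after (vs : List Int)
    (h0 : (0:Int) ∈ vs.dropWhile (fun x => decide (x = 0))) :
    2 ≤ cnt 0 0 vs := by
  have hsplit := List.takeWhile_append_dropWhile (p := fun x : Int => decide (x = 0)) (l := vs)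
  have htw : ∀ x ∈ vs.takeWhile (fun x : Int => decide (x = 0)), x = (0:Int) := by
    intro x hx
    simpa using List.mem_takeWhile_imp hx
  have hne : vs.dropWhile (fun x : Int => decide (x = 0)) ≠ [] := by
    intro h; rw [h] at h0; simp at h0
  obtain ⟨h, rest, hdw⟩ := List.exists_cons_of_ne_nil hne
  have hh : h ≠ (0:Int) := by
    have := List.head_dropWhile_not (fun x : Int => decide (x = 0)) hne
    have hx : (vs.dropWhile (fun x : Int => decide (x = 0))).head hne = h := by simp [hdw]
    rw [hx] at this
    simpa using this
  calc 2 ≤ cnt 0 0 (vs.dropWhile (fun x : Int => decide (x = 0))) := by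
        rw [hdw]
        simp only [cnt, if_pos (show h ≠ (0:Int) from hh)]
        have h0' : (0:Int) ∈ rest := by
          rw [hdw] at h0
          rcases List.mem_cons.mp h0 with h' | h'
          · exact absurd h'.symm hh
          · exact h'
        have := cnt_mem_ne rest h (0 + 1) 0 h0' (fun hc => hh hc.symm)
        omega
    _ = cnt 0 0 vs := by
        conv_rhs => rw [← hsplit]
        exact (cnt_skip _ _ _ _ htw).symm

lemma cnt_one_of_bad (vs : List Int)
    (hnz : ∃ v ∈ vs, v ≠ 0)
    (hsame : ∀ a ∈ vs, ∀ b ∈ vs, a ≠ 0 → b ≠ 0 → a = b)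
    (hord : (0:Int) ∉ vs.dropWhile (fun x => decide (x = 0))) :
    cnt 0 0 vs = 1 := by
  have hsplit := List.takeWhile_append_dropWhile (p := fun x : Int => decide (x = 0)) (l := vs)
  have htw : ∀ x ∈ vs.takeWhile (fun x : Int => decide (x = 0)), x = (0:Int) := by
    intro x hx
    simpa using List.mem_takeWhile_imp hx
  obtain ⟨w, hw, hw0⟩ := hnz
  have hwd : w ∈ vs.dropWhile (fun x : Int => decide (x = 0)) := by
    rcases List.mem_append.mp (by rw [hsplit]; exact hw :
        w ∈ vs.takeWhile (fun x : Int => decide (x = 0)) ++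
          vs.dropWhile (fun x : Int => decide (x = 0))) with h' | h'
    · exact absurd (htw w h') hw0
    · exact h'
  have hne : vs.dropWhile (fun x : Int => decide (x = 0)) ≠ [] := by
    intro h; rw [h] at hwd; simp at hwd
  obtain ⟨h, rest, hdw⟩ := List.exists_cons_of_ne_nil hne
  have hh : h ≠ (0:Int) := by
    have := List.head_dropWhile_not (fun x : Int => decide (x = 0)) hne
    have hx : (vs.dropWhile (fun x : Int => decide (x = 0))).head hne = h := by simp [hdw]
    rw [hx] at this
    simpa using this
  have hmemvs : ∀ x ∈ vs.dropWhile (fun x : Int => decide (x = 0)), x ∈ vs := by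
    intro x hx
    rw [← hsplit]
    exact List.mem_append.mpr (Or.inr hx)
  have hrest : ∀ x ∈ rest, x = h := by
    intro x hx
    have hxd : x ∈ vs.dropWhile (fun x : Int => decide (x = 0)) := by
      rw [hdw]; exact List.mem_cons.mpr (Or.inr hx)
    have hx0 : x ≠ 0 := by
      intro hc; subst hc; exact hord hxd
    exact hsame x (hmemvs x hxd) h (hmemvs h (by rw [hdw]; simp)) hx0 hh
  calc cnt 0 0 vs = cnt 0 0 (vs.dropWhile (fun x : Int => decide (x = 0))) := by
        conv_lhs => rw [← hsplit]
        exact cnt_skip _ _ _ _ htw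
    _ = 1 := by
        rw [hdw]
        simp only [cnt, if_pos (show h ≠ (0:Int) from hh)]
        simpa using cnt_const rest h (0 + 1) hrest

lemma two_le_ofList_iff (vs : List Int) :
    2 ≤ (PySem.Set.ofList vs).length ↔ ∃ a ∈ vs, ∃ b ∈ vs, a ≠ b := by
  constructor
  · intro h
    match hs : PySem.Set.ofList vs with
    | [] => rw [hs] at h; simp at h
    | [x] => rw [hs] at h; simp at h
    | x :: y :: r =>
      have hnd := PySem.Set.nodup_ofList vs
      rw [hs] at hnd
      have hxy : x ≠ y := by
        intro hc; subst hc; simp at hnd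
      have hx : x ∈ vs := by
        rw [← PySem.Set.mem_ofList, hs]; simp
      have hy : y ∈ vs := by
        rw [← PySem.Set.mem_ofList, hs]; simp
      exact ⟨x, hx, y, hy, hxy⟩
  · rintro ⟨a, ha, b, hb, hab⟩
    have ha' : a ∈ PySem.Set.ofList vs := (PySem.Set.mem_ofList vs a).mpr ha
    have hb' : b ∈ PySem.Set.ofList vs := (PySem.Set.mem_ofList vs b).mpr hb
    match hs : PySem.Set.ofList vs with
    | [] => rw [hs] at ha'; simp at ha'
    | [x] =>
      rw [hs] at ha' hb'
      simp at ha' hb'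
      exact absurd (ha'.trans hb'.symm) hab
    | x :: y :: r => simp

lemma foldl_add_headI (ys : List Int) : ∀ (st : List Int), st ≠ [] →
    (ys.foldl PySem.Set.add st).headI = st.headI := by
  induction ys with
  | nil => intro st _; rfl
  | cons y ys ih =>
    intro st h
    show ((ys.foldl PySem.Set.add (PySem.Set.add st y))).headI = _
    rw [ih (PySem.Set.add st y) (by unfold PySem.Set.add PySem.Set.contains; split <;> simp [h])]
    unfold PySem.Set.add PySem.Set.contains
    split
    · rfl
    · cases st with
      | nil => exact absurd rfl h
      | cons a t => simp

lemma ofList_cons_headI (x : Int) (xs : List Int) :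
    (PySem.Set.ofList (x :: xs)).headI = x := by
  rw [PySem.Set.ofList_eq_foldl]
  show ((xs.foldl PySem.Set.add (PySem.Set.add [] x))).headI = x
  rw [foldl_add_headI xs _ (by simp [PySem.Set.add, PySem.Set.contains])]
  rfl

lemma nodup_len_le_two (T : List Int) (v : Int) (hnd : T.Nodup)
    (h : ∀ x ∈ T, x = 0 ∨ x = v) : T.length ≤ 2 := by
  match T, hnd, h with
  | [], _, _ => simp
  | [_], _, _ => simp
  | [_, _], _, _ => simp
  | a :: b :: c :: _, hnd, h =>
    exfalso
    have hab : a ≠ b := by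
      have := List.nodup_cons.mp hnd
      exact fun hc => this.1 (by simp [hc])
    have hac : a ≠ c := by
      have := List.nodup_cons.mp hnd
      exact fun hc => this.1 (by simp [hc])
    have hbc : b ≠ c := by
      have := List.nodup_cons.mp (List.nodup_cons.mp hnd).2
      exact fun hc => this.1 (by simp [hc])
    rcases h a (by simp) with rfl | rfl <;> rcases h b (by simp) with rfl | rfl <;>
      rcases h c (by simp) with h' | h' <;> omega

lemma D_of_bad (l : List Int)
    (hforb : ∀ x ∈ l, ¬(x = 105 ∨ x = 108 ∨ x = 111))
    (ht : pvHasTriple l = true)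
    (h0S : (0:Int) ∈ pvPairSeq l)
    (hnzS : ∃ v ∈ pvPairSeq l, v ≠ 0)
    (hsame : ∀ a ∈ pvPairSeq l, ∀ b ∈ pvPairSeq l, a ≠ 0 → b ≠ 0 → a = b)
    (hord : (0:Int) ∉ (pvPairSeq l).dropWhile (fun x => decide (x = 0))) :
    D_is_validated l := by
  refine ⟨?_, (diffs_infix_iff l).mpr ht, ?_⟩
  · intro x hx
    simpa [pyFORBIDDEN] using hforb x hx
  simp only [pairSeq_eq_filterMap, PySem.List.dedup_eq_ofList, beq_zero_fun]
  refine ⟨?_, ?_, hord⟩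
  · obtain ⟨v, hv, hv0⟩ := hnzS
    have h2 : 2 ≤ (PySem.Set.ofList (pvPairSeq l)).length :=
      (two_le_ofList_iff _).mpr ⟨0, h0S, v, hv, fun hc => hv0 hc.symm⟩
    have hle : (PySem.Set.ofList (pvPairSeq l)).length ≤ 2 := by
      refine nodup_len_le_two _ v (PySem.Set.nodup_ofList _) ?_
      intro x hx
      have hxS : x ∈ pvPairSeq l := (PySem.Set.mem_ofList _ x).mp hx
      by_cases hx0 : x = 0
      · exact Or.inl hx0
      · exact Or.inr (hsame x hxS v hv hx0 hv0)
    omega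
  · cases hS : pvPairSeq l with
    | nil => rw [hS] at h0S; simp at h0S
    | cons a t =>
      have ha : a = 0 := by
        by_contra hne
        apply hord
        rw [hS, List.dropWhile_cons_of_neg (by simpa using hne)]
        rw [hS] at h0S
        exact h0S
      simp [ha]

lemma bad_of_D (l : List Int) (hd : D_is_validated l) :
    (∀ x ∈ l, ¬(x = 105 ∨ x = 108 ∨ x = 111)) ∧ pvHasTriple l = true ∧
    (0:Int) ∈ pvPairSeq l ∧ (∃ v ∈ pvPairSeq l, v ≠ 0) ∧
    (∀ a ∈ pvPairSeq l, ∀ b ∈ pvPairSeq l, a ≠ 0 → b ≠ 0 → a = b) ∧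
    (0:Int) ∉ (pvPairSeq l).dropWhile (fun x => decide (x = 0)) := by
  obtain ⟨hforbD, ht, hrest⟩ := hd
  simp only [pairSeq_eq_filterMap, PySem.List.dedup_eq_ofList, beq_zero_fun] at hrest
  obtain ⟨hlen2, hhead, hord⟩ := hrest
  obtain ⟨x, y, hxy⟩ := List.length_eq_two.mp hlen2
  have hx0 : x = 0 := by
    cases hS : pvPairSeq l with
    | nil =>
      rw [hS] at hxy
      simp [PySem.Set.ofList_eq_foldl] at hxy
    | cons a t =>
      rw [hS] at hhead hxy
      have ha : a = 0 := by simpa using hhead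
      have h' := congrArg List.headI hxy
      rw [ofList_cons_headI] at h'
      simp at h'
      omega
  have hnd := PySem.Set.nodup_ofList (pvPairSeq l)
  rw [hxy] at hnd
  have hy0 : y ≠ 0 := by
    intro hc
    rw [hx0, hc] at hnd
    simp at hnd
  have hymem : y ∈ pvPairSeq l := by
    rw [← PySem.Set.mem_ofList, hxy]
    simp
  have hmemD : ∀ z ∈ pvPairSeq l, z = 0 ∨ z = y := by
    intro z hz
    have : z ∈ PySem.Set.ofList (pvPairSeq l) := (PySem.Set.mem_ofList _ z).mpr hz
    rw [hxy, hx0] at this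
    simpa using this
  refine ⟨fun z hz hor => hforbD z hz (by simp [pyFORBIDDEN]; tauto),
    (diffs_infix_iff l).mp ht, ?_, ⟨y, hymem, hy0⟩, ?_, hord⟩
  · have : x ∈ pvPairSeq l := by
      rw [← PySem.Set.mem_ofList, hxy]
      simp
    rwa [hx0] at this
  · intro p hp q hq hp0 hq0
    rcases hmemD p hp with rfl | rfl
    · exact absurd rfl hp0
    · rcases hmemD q hq with rfl | h'
      · exact absurd rfl hq0
      · rw [h']

-- the central comparison of the two counting criteria, under ¬D
lemma cnt_vs_set (l : List Int)
    (hforb : ∀ x ∈ l, ¬(x = 105 ∨ x = 108 ∨ x = 111))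
    (ht : pvHasTriple l = true)
    (hnd : ¬ D_is_validated l) :
    decide (2 ≤ cnt 0 0 (pvPairSeq l)) = decide (2 ≤ (PySem.Set.ofList (pvPairSeq l)).length) := by
  rw [decide_eq_decide]
  constructor
  · intro h2
    obtain ⟨x, hx, y, hy, hxy⟩ := cnt_ge_two_ex (pvPairSeq l) 0 0 (by omega)
    exact (two_le_ofList_iff _).mpr ⟨x, hx, y, hy, hxy⟩
  · intro h2
    obtain ⟨x, hx, y, hy, hxy⟩ := (two_le_ofList_iff _).mp h2
    by_cases hsame : ∀ a ∈ pvPairSeq l, ∀ b ∈ pvPairSeq l, a ≠ 0 → b ≠ 0 → a = b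
    · -- all nonzero pair values coincide, so one of x, y is 0 and the other is not
      have hcase : (0:Int) ∈ pvPairSeq l ∧ ∃ v ∈ pvPairSeq l, v ≠ 0 := by
        by_cases hx0 : x = 0
        · subst hx0
          exact ⟨hx, y, hy, fun hc => hxy hc.symm⟩
        · by_cases hy0 : y = 0
          · subst hy0
            exact ⟨hy, x, hx, hx0⟩
          · exact absurd (hsame x hx y hy hx0 hy0) hxy
      obtain ⟨h0S, hnzS⟩ := hcase
      by_cases hord : (0:Int) ∈ (pvPairSeq l).dropWhile (fun x => decide (x = 0))
      · exact cnt_two_of_zero_after _ hord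
      · exact absurd (D_of_bad l hforb ht h0S hnzS hsame hord) hnd
    · push Not at hsame
      obtain ⟨p, hp, q, hq, hp0, hq0, hpq⟩ := hsame
      exact cnt_two_of_distinct_nonzero _ p q hp hq hpq hp0 hq0

lemma forb_of_not_any (l : List Int)
    (hf : ¬ (l.any fun number => pyFORBIDDEN.contains number) = true) :
    ∀ x ∈ l, ¬(x = 105 ∨ x = 108 ∨ x = 111) := by
  intro x hx hor
  apply hf
  simp only [List.any_eq_true]
  refine ⟨x, hx, ?_⟩
  simpa [pyFORBIDDEN] using hor

theorem is_validated_spec : Claim_unchanged_is_validated := by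
  intro l _ hpre
  unfold Spec_is_validated
  intro hnd
  by_cases hf : (l.any fun number => pyFORBIDDEN.contains number) = true
  · unfold is_validated is_validated_alt
    rw [if_pos hf, if_pos hf]
  · have hforb := forb_of_not_any l hf
    have hlen : 2 ≤ l.length := by
      rcases hpre with h | ⟨x, hx, hor⟩
      · exact h
      · exact absurd hor (hforb x hx)
    match l, hlen with
    | a :: b :: rest, _ =>
      rw [A_char a b rest hf, B_char _ hf]
      by_cases ht : pvHasTriple (a :: b :: rest) = true
      · rw [ht, cnt_vs_set _ hforb ht hnd]
      · rw [Bool.eq_false_iff.mpr ht]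
        simp

theorem is_validated_changed : Claim_changed_is_validated := by
  unfold Claim_changed_is_validated; decide
theorem is_validated_tight : Claim_exact_is_validated := by
  intro l _ hpre hd
  obtain ⟨hforb, ht, h0S, ⟨v, hv, hv0⟩, hsame, hord⟩ := bad_of_D l hd
  have hf : ¬ (l.any fun number => pyFORBIDDEN.contains number) = true := by
    simp only [List.any_eq_true, not_exists]
    intro x hc
    obtain ⟨hx, hcon⟩ := hc
    exact hforb x hx (by simpa [pyFORBIDDEN] using hcon)
  have hlen : 2 ≤ l.length := by
    rcases hpre with h | ⟨x, hx, hor⟩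
    · exact h
    · exact absurd hor (hforb x hx)
  match l, hlen with
  | a :: b :: rest, _ =>
    rw [A_char a b rest hf, B_char _ hf, ht,
      (by simpa using cnt_one_of_bad _ ⟨v, hv, hv0⟩ hsame hord :
        cnt 0 0 (pvPairSeq (a :: b :: rest)) = 1)]
    rw [decide_eq_true ((two_le_ofList_iff _).mpr ⟨0, h0S, v, hv, fun hc => hv0 hc.symm⟩)]
    simp
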